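-- pv_equiv track=rewrite | github.com/EliasJFigueredoR/Bootcamp-Roshka | Vacas_Y_Toros_EliasF.py | validar_Numero
-- ===== SOURCE A (Python) =====
-- def validar_Numero(Numero):
--     if not Numero.isdigit() or len(Numero) != 4:
--         return False
--
--     for d1 in Numero:
--         contador = 0
--         for d2 in Numero:
--             if d1 == d2:
--                 contador = contador + 1
--         if contador > 1:
--             return False
--
--     return True
-- ===== SOURCE B (Python) =====
-- def validar_Numero(Numero):
--     if not Numero.isdigit() or len(Numero) != 4:
--         return False
--     return len(set(Numero)) == 4
-- ===== Notes on version B (the rewrite author's own statement) =====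
-- stated objective: simpler
-- what changed: Replaces the quadratic nested per-character counting loop with a single set-based distinctness check: len(set(Numero)) == 4.
import Mathlib
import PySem

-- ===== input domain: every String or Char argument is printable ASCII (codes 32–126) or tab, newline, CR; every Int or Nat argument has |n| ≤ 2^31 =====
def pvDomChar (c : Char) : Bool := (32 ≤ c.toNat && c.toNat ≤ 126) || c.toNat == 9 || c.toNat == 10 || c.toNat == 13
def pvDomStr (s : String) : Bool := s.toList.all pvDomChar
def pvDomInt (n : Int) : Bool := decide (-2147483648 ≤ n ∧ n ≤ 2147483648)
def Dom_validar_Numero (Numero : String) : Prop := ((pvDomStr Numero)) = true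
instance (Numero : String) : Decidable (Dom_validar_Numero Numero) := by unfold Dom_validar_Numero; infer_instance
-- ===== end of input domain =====

-- B replaces A's quadratic nested per-character counting loop with a single
-- set-based distinctness check (len(set(Numero)) == 4); objective: simpler.

-- ===== PORT A =====
-- inner loop: contador = 0; for d2 in Numero: if d1 == d2: contador += 1
def pvContador (d1 : Char) (all : List Char) : Int :=
  all.foldl (fun contador d2 => if d1 == d2 then contador + 1 else contador) 0

-- outer loop with early 'return False'
def pvLoopA : List Char → List Char → Bool
  | [], _ => true
  | d1 :: rest, all => if pvContador d1 all > 1 then false else pvLoopA rest all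

def validar_Numero (Numero : String) : Bool :=
  if !PySem.Str.strIsdigit Numero || PySem.Str.len Numero != 4 then false
  else pvLoopA Numero.toList Numero.toList

-- ===== PORT B =====
def validar_Numero_alt (Numero : String) : Bool :=
  if !PySem.Str.strIsdigit Numero || PySem.Str.len Numero != 4 then false
  else (PySem.Set.ofList Numero.toList).length == 4

-- ===== PRECONDITION & SPEC =====
def Spec_validar_Numero (Numero : String) (out : Bool) : Prop := out = validar_Numero_alt Numero
instance (Numero : String) (out : Bool) : Decidable (Spec_validar_Numero Numero out) := by unfold Spec_validar_Numero; infer_instance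

-- ===== CLAIM (what is proved, stated in full; the proofs are below) =====
def Claim_equal_validar_Numero : Prop := ∀ (Numero : String), Dom_validar_Numero Numero → Spec_validar_Numero Numero (validar_Numero Numero)

-- ===== LEMMAS AND PROOFS =====

theorem pvContador_eq (d1 : Char) (l : List Char) : pvContador d1 l = (l.count d1 : Int) := by
  have h : (fun (contador : Int) d2 => if d1 == d2 then contador + 1 else contador)
      = (fun (contador : Int) d2 => if d2 == d1 then contador + 1 else contador) := by
    funext c d2
    rcases eq_or_ne d1 d2 with rfl | hne
    · simp
    · simp [hne, hne.symm]
  rw [pvContador, h, PySem.List.foldl_beq_add_one]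
  simp

theorem pvLoopA_eq_true_iff (l all : List Char) :
    pvLoopA l all = true ↔ ∀ d1 ∈ l, all.count d1 ≤ 1 := by
  induction l with
  | nil => simp [pvLoopA]
  | cons d1 rest ih =>
    simp only [pvLoopA, pvContador_eq]
    split
    · rename_i h
      simp only [Bool.false_eq_true, false_iff]
      intro hall
      have := hall d1 (by simp)
      omega
    · rename_i h
      rw [ih]
      constructor
      · intro hall d mem
        rcases List.mem_cons.mp mem with rfl | hm
        · omega
        · exact hall d hm
      · intro hall d mem
        exact hall d (List.mem_cons_of_mem _ mem)

theorem pvLoopA_self (l : List Char) : pvLoopA l l = decide l.Nodup := by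
  by_cases h : l.Nodup
  · simp [h]
    rw [pvLoopA_eq_true_iff]
    intro d _
    exact List.nodup_iff_count_le_one.mp h d
  · simp [h]
    rw [← Bool.not_eq_true, pvLoopA_eq_true_iff]
    intro hall
    exact h (List.nodup_iff_count_le_one.mpr fun a => by
      by_cases ha : a ∈ l
      · exact hall a ha
      · simp [List.count_eq_zero_of_not_mem ha])

theorem ofList_length_eq (l : List Char) :
    (PySem.Set.ofList l).length = l.toFinset.card := by
  rw [← List.toFinset_card_of_nodup (PySem.Set.nodup_ofList l)]
  congr 1
  ext a
  simp [PySem.Set.mem_ofList]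

theorem setlen_eq_nodup (l : List Char) (h : l.length = 4) :
    (((PySem.Set.ofList l).length : Nat) == 4) = decide l.Nodup := by
  rw [ofList_length_eq]
  by_cases hn : l.Nodup
  · simp [hn, List.toFinset_card_of_nodup hn, h]
  · simp [hn]
    have hcard : l.toFinset.card ≠ l.length := by
      intro hc
      exact hn (Multiset.toFinset_card_eq_card_iff_nodup.mp hc)
    have hle := List.toFinset_card_le l
    omega

-- ===== VERDICT (by name: the statement is the Claim_ definition above) =====
theorem validar_Numero_spec : Claim_equal_validar_Numero := by
  intro Numero _
  unfold Spec_validar_Numero validar_Numero validar_Numero_alt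
  split
  · rfl
  · rename_i h
    have hlen : Numero.toList.length = 4 := by
      simp [PySem.Str.len_eq] at h
      exact_mod_cast h.2
    rw [pvLoopA_self, setlen_eq_nodup _ hlen]
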